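-- pv_equiv track=rewrite | github.com/gullo97/Volumetric-MPP | calibration_clean/calibration_core.py | apply_channel_range_filter
-- ===== SOURCE A (Python) =====
-- from typing import Dict, List, Tuple, Union, Optional
--
-- def apply_channel_range_filter(peaks: List[int],
--                              channel_ranges: List[Tuple[int, int]]) -> List[int]:
--     """
--     Filter peaks by expected channel ranges.
--
--     Parameters:
--         peaks: List of peak channel positions
--         channel_ranges: List of (min, max) channel ranges
--
--     Returns:
--         Filtered peaks within expected ranges
--     """
--     if not channel_ranges:
--         return peaks
--
--     filtered_peaks = []
--     for peak in peaks:
--         for min_ch, max_ch in channel_ranges: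
--             if min_ch <= peak <= max_ch:
--                 filtered_peaks.append(peak)
--                 break
--
--     return filtered_peaks
-- ===== SOURCE B (Python) =====
-- def apply_channel_range_filter(peaks, channel_ranges):
--     """Same result as A: keep (in order, with duplicates) each peak lying in
--     some (min,max) range; if channel_ranges is empty return peaks unchanged.
--     Faster: sort ranges by their min, merge them into disjoint intervals once,
--     then binary-search each peak instead of scanning all ranges per peak."""
--     if not channel_ranges:
--         return peaks
--     merged = []
--     for lo, hi in sorted(channel_ranges, key=lambda r: r[0]):
--         if merged and lo <= merged[-1][1]:
--             if hi > merged[-1][1]: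
--                 merged[-1] = (merged[-1][0], hi)
--         else:
--             merged.append((lo, hi))
--     n = len(merged)
--     out = []
--     for p in peaks:
--         lo_i, hi_i = 0, n
--         while lo_i < hi_i:
--             mid = (lo_i + hi_i) // 2
--             if merged[mid][0] <= p:
--                 lo_i = mid + 1
--             else:
--                 hi_i = mid
--         if lo_i > 0 and p <= merged[lo_i - 1][1]:
--             out.append(p)
--     return out
-- ===== Notes on version B (the rewrite author's own statement) =====
-- stated objective: faster
-- what changed: Replaces A's per-peak linear scan over all channel ranges by a one-time sort of the ranges by their minimum, a merge into disjoint ordered intervals, and a binary search per peak.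
import Mathlib
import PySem

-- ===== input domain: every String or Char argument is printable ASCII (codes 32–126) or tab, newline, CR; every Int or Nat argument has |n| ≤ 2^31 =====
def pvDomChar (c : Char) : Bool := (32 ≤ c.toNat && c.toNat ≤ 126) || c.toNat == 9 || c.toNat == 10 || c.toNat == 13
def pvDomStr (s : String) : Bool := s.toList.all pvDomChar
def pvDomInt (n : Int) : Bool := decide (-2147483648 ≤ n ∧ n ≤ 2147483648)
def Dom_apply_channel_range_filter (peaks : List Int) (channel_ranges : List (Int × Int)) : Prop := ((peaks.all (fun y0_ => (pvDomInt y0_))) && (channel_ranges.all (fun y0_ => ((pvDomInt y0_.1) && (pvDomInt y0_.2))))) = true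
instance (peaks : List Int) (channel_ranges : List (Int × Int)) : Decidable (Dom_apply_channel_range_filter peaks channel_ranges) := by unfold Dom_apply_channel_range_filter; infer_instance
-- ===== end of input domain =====

-- B replaces A's per-peak scan over all ranges by sort+merge of the ranges and
-- a binary search per peak (objective: faster); return values proved equal.

-- ===== PORT A =====
-- inner `for min_ch, max_ch in channel_ranges: … break` loop of A
def pvInnerA (p : Int) (rs : List (Int × Int)) (acc : List Int) : List Int :=
  match rs with
  | [] => acc
  | (mn, mx) :: rest => if mn ≤ p ∧ p ≤ mx then acc ++ [p] else pvInnerA p rest acc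

def apply_channel_range_filter (peaks : List Int) (channel_ranges : List (Int × Int)) : List Int :=
  if channel_ranges = [] then peaks
  else peaks.foldl (fun acc p => pvInnerA p channel_ranges acc) []

-- ===== PORT B =====
-- one merge-loop step of Source B; the Python list `merged` (appended to at the end,
-- `merged[-1]` updated) is kept here in REVERSE, head = Python's merged[-1]
def pvMergeStep (racc : List (Int × Int)) (r : Int × Int) : List (Int × Int) :=
  match racc with
  | (l, h) :: rest =>
      if r.1 ≤ h then (if r.2 > h then (l, r.2) :: rest else (l, h) :: rest)
      else r :: (l, h) :: rest
  | [] => [r]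

-- the `while lo_i < hi_i` binary-search loop of Source B
def pvBsearch (merged : List (Int × Int)) (p : Int) (lo hi : Nat) : Nat :=
  if _h : lo < hi then
    -- mid = (lo + hi) // 2, inlined
    if (merged.getD ((lo + hi) / 2) (0, 0)).1 ≤ p then pvBsearch merged p ((lo + hi) / 2 + 1) hi
    else pvBsearch merged p lo ((lo + hi) / 2)
  else lo
termination_by hi - lo
decreasing_by all_goals omega

def apply_channel_range_filter_alt (peaks : List Int) (channel_ranges : List (Int × Int)) : List Int :=
  if channel_ranges = [] then peaks
  else
    let merged := ((PySem.List.sorted channel_ranges (fun r => r.1) false).foldl pvMergeStep []).reverse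
    let n := merged.length
    peaks.foldl (fun out p =>
      let i := pvBsearch merged p 0 n
      if 0 < i ∧ p ≤ (merged.getD (i - 1) (0, 0)).2 then out ++ [p] else out) []

-- ===== PRECONDITION & SPEC =====
def Spec_apply_channel_range_filter (peaks : List Int) (channel_ranges : List (Int × Int)) (out : List Int) : Prop := out = apply_channel_range_filter_alt peaks channel_ranges
instance (peaks : List Int) (channel_ranges : List (Int × Int)) (out : List Int) : Decidable (Spec_apply_channel_range_filter peaks channel_ranges out) := by unfold Spec_apply_channel_range_filter; infer_instance

-- ===== CLAIM (what is proved, stated in full; the proofs are below) =====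
def Claim_equal_apply_channel_range_filter : Prop := ∀ (peaks : List Int) (channel_ranges : List (Int × Int)), Dom_apply_channel_range_filter peaks channel_ranges → Spec_apply_channel_range_filter peaks channel_ranges (apply_channel_range_filter peaks channel_ranges)

-- ===== LEMMAS AND PROOFS =====

-- "peak p lies in range r"
def pvCov (p : Int) (r : Int × Int) : Bool := decide (r.1 ≤ p ∧ p ≤ r.2)

lemma pvInnerA_eq (p : Int) (rs : List (Int × Int)) (acc : List Int) :
    pvInnerA p rs acc = if rs.any (pvCov p) then acc ++ [p] else acc := by
  induction rs with
  | nil => simp [pvInnerA]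
  | cons r rest ih =>
    obtain ⟨mn, mx⟩ := r
    by_cases h : mn ≤ p ∧ p ≤ mx
    · simp [pvInnerA, h, pvCov]
    · have hd : pvCov p (mn, mx) = false := by
        simp only [pvCov]; exact decide_eq_false h
      have hstep : pvInnerA p ((mn, mx) :: rest) acc = pvInnerA p rest acc := by
        simp [pvInnerA, h]
      rw [hstep, ih, List.any_cons, hd, Bool.false_or]

lemma A_eq_filter (peaks : List Int) (rs : List (Int × Int)) (h : rs ≠ []) :
    apply_channel_range_filter peaks rs = peaks.filter (fun p => rs.any (pvCov p)) := by
  unfold apply_channel_range_filter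
  rw [if_neg h]
  have hf : (fun (acc : List Int) (p : Int) => pvInnerA p rs acc)
      = fun acc p => if (fun q => rs.any (pvCov q)) p = true then acc ++ [id p] else acc := by
    funext acc p; simp [pvInnerA_eq]
  rw [hf, PySem.List.foldl_append_if]
  simp

-- merge-loop invariant: the reversed accumulator is a chain of ordered,
-- separated intervals covering exactly what the processed ranges cover
lemma merge_invariant (ss : List (Int × Int)) (racc : List (Int × Int))
    (hs : ss.Pairwise (fun a b => a.1 ≤ b.1))
    (hcross : ∀ x ∈ ss, ∀ q ∈ racc, q.1 ≤ x.1)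
    (hr : racc.Pairwise (fun a b => b.1 ≤ a.1 ∧ b.2 < a.1)) :
    (ss.foldl pvMergeStep racc).Pairwise (fun a b => b.1 ≤ a.1 ∧ b.2 < a.1) ∧
    ∀ p, (ss.foldl pvMergeStep racc).any (pvCov p) = (racc.any (pvCov p) || ss.any (pvCov p)) := by
  induction ss generalizing racc with
  | nil => simpa using hr
  | cons r ss ih =>
    obtain ⟨hr1, hs'⟩ := List.pairwise_cons.mp hs
    have hfirst : ∀ q ∈ pvMergeStep racc r, q.1 = r.1 ∨ ∃ q0 ∈ racc, q.1 = q0.1 := by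
      intro q hq
      cases racc with
      | nil =>
        left; simp [pvMergeStep] at hq; simp [hq]
      | cons a rest =>
        obtain ⟨l, hh⟩ := a
        simp only [pvMergeStep] at hq
        split_ifs at hq with h1 h2
        · rcases List.mem_cons.mp hq with h | h
          · right; exact ⟨(l, hh), by simp, by simp [h]⟩
          · right; exact ⟨q, by simp [h], rfl⟩
        · right; exact ⟨q, hq, rfl⟩
        · rcases List.mem_cons.mp hq with h | h
          · left; simp [h]
          · right; exact ⟨q, h, rfl⟩
    have hcross' : ∀ x ∈ ss, ∀ q ∈ pvMergeStep racc r, q.1 ≤ x.1 := by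
      intro x hx q hq
      rcases hfirst q hq with h | ⟨q0, hq0, h⟩
      · rw [h]; exact hr1 x hx
      · rw [h]; exact hcross x (by simp [hx]) q0 hq0
    have hpw' : (pvMergeStep racc r).Pairwise (fun a b => b.1 ≤ a.1 ∧ b.2 < a.1) := by
      cases racc with
      | nil => simp [pvMergeStep]
      | cons a rest =>
        obtain ⟨l, hh⟩ := a
        obtain ⟨hhead, hrest⟩ := List.pairwise_cons.mp hr
        have hl : l ≤ r.1 := hcross r (by simp) (l, hh) (by simp)
        simp only [pvMergeStep]
        split_ifs with h1 h2
        · exact List.pairwise_cons.mpr ⟨fun q hq => ⟨(hhead q hq).1, (hhead q hq).2⟩, hrest⟩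
        · exact hr
        · refine List.pairwise_cons.mpr ⟨?_, hr⟩
          intro q hq
          rcases List.mem_cons.mp hq with h | h
          · subst h; exact ⟨hl, by omega⟩
          · have := hhead q h
            exact ⟨le_trans (this.1) hl, by omega⟩
    have hcov' : ∀ p, (pvMergeStep racc r).any (pvCov p) = (racc.any (pvCov p) || pvCov p r) := by
      intro p
      cases racc with
      | nil => simp [pvMergeStep]
      | cons a rest =>
        obtain ⟨l, hh⟩ := a
        have hl : l ≤ r.1 := hcross r (by simp) (l, hh) (by simp)
        simp only [pvMergeStep]
        split_ifs with h1 h2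
        · cases hb : rest.any (pvCov p) with
          | true => simp [hb]
          | false =>
            rw [Bool.eq_iff_iff]
            simp only [List.any_cons, hb, Bool.or_false, Bool.or_eq_true, pvCov, decide_eq_true_eq]
            omega
        · cases hb : rest.any (pvCov p) with
          | true => simp [hb]
          | false =>
            rw [Bool.eq_iff_iff]
            simp only [List.any_cons, hb, Bool.or_false, Bool.or_eq_true, pvCov, decide_eq_true_eq]
            omega
        · simp only [List.any_cons]
          cases pvCov p r <;> cases pvCov p (l, hh) <;> cases rest.any (pvCov p) <;> simp
    obtain ⟨hp, hc⟩ := ih (pvMergeStep racc r) hs' hcross' hpw'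
    refine ⟨by simpa using hp, ?_⟩
    intro p
    simp only [List.foldl_cons, List.any_cons]
    rw [hc p, hcov' p]
    cases racc.any (pvCov p) <;> cases pvCov p r <;> simp

lemma bsearch_spec (M : List (Int × Int)) (p : Int)
    (hmono : ∀ (i j : Nat) (_ : i < M.length) (_ : j < M.length), i ≤ j → M[i].1 ≤ M[j].1) :
    ∀ (k lo hi : Nat), hi - lo ≤ k → lo ≤ hi → hi ≤ M.length →
    (∀ (j : Nat) (_ : j < M.length), j < lo → M[j].1 ≤ p) →
    (∀ (j : Nat) (_ : j < M.length), hi ≤ j → p < M[j].1) →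
    lo ≤ pvBsearch M p lo hi ∧ pvBsearch M p lo hi ≤ hi ∧
    (∀ (j : Nat) (_ : j < M.length), j < pvBsearch M p lo hi → M[j].1 ≤ p) ∧
    (∀ (j : Nat) (_ : j < M.length), pvBsearch M p lo hi ≤ j → p < M[j].1) := by
  intro k
  induction k with
  | zero =>
    intro lo hi hk hle hlen hlo hhi
    have : lo = hi := by omega
    rw [pvBsearch, dif_neg (by omega)]
    exact ⟨le_refl _, by omega, hlo, fun j hj h => hhi j hj (by omega)⟩
  | succ k ih =>
    intro lo hi hk hle hlen hlo hhi
    by_cases h : lo < hi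
    · rw [pvBsearch, dif_pos h]
      have hmid1 : lo ≤ (lo + hi) / 2 := by omega
      have hmid2 : (lo + hi) / 2 < hi := by omega
      have hmlt : (lo + hi) / 2 < M.length := by omega
      rw [List.getD_eq_getElem M (0, 0) hmlt]
      by_cases hc : M[(lo + hi) / 2].1 ≤ p
      · rw [if_pos hc]
        obtain ⟨h1, h2, h3, h4⟩ := ih ((lo + hi) / 2 + 1) hi (by omega) (by omega) hlen
          (fun j hj hjlt => by
            by_cases hj2 : j < lo
            · exact hlo j hj hj2
            · exact le_trans (hmono j ((lo + hi) / 2) hj hmlt (by omega)) hc)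
          hhi
        exact ⟨by omega, h2, h3, h4⟩
      · rw [if_neg hc]
        obtain ⟨h1, h2, h3, h4⟩ := ih lo ((lo + hi) / 2) (by omega) (by omega) (by omega) hlo
          (fun j hj hjge =>
            lt_of_lt_of_le (by omega) (hmono ((lo + hi) / 2) j hmlt hj hjge))
        exact ⟨h1, by omega, h3, h4⟩
    · rw [pvBsearch, dif_neg h]
      exact ⟨le_refl _, by omega, hlo, fun j hj hge => hhi j hj (by omega)⟩

lemma keep_iff_any (M : List (Int × Int)) (p : Int)
    (hpw : M.Pairwise (fun a b => a.1 ≤ b.1 ∧ a.2 < b.1)) :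
    (0 < pvBsearch M p 0 M.length ∧
      p ≤ (M.getD (pvBsearch M p 0 M.length - 1) (0, 0)).2) ↔ M.any (pvCov p) = true := by
  have hpw' := List.pairwise_iff_getElem.mp hpw
  have hmono : ∀ (i j : Nat) (_ : i < M.length) (_ : j < M.length), i ≤ j → M[i].1 ≤ M[j].1 := by
    intro i j hi hj hij
    rcases Nat.lt_or_ge i j with h | h
    · exact (hpw' i j hi hj h).1
    · have : i = j := by omega
      subst this; exact le_refl _
  obtain ⟨h0, hle, hbelow, habove⟩ := bsearch_spec M p hmono M.length 0 M.length
    (by omega) (by omega) (le_refl _) (fun j hj h => absurd h (by omega))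
    (fun j hj h => absurd hj (by omega))
  set r := pvBsearch M p 0 M.length with hr
  constructor
  · rintro ⟨hrpos, hcov⟩
    have hrlt : r - 1 < M.length := by omega
    rw [List.getD_eq_getElem M (0, 0) hrlt] at hcov
    refine List.any_eq_true.mpr ⟨M[r - 1], List.getElem_mem hrlt, ?_⟩
    exact decide_eq_true_eq.mpr ⟨hbelow (r - 1) hrlt (by omega), hcov⟩
  · intro hany
    obtain ⟨x, hx, hxc⟩ := List.any_eq_true.mp hany
    obtain ⟨j, hj, hxe⟩ := List.mem_iff_getElem.mp hx
    obtain ⟨hj1, hj2⟩ := decide_eq_true_eq.mp (hxe ▸ hxc)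
    have hjr : j < r := by
      by_contra hge
      exact absurd hj1 (not_le.mpr (habove j hj (by omega)))
    have hrpos : 0 < r := by omega
    have hrlt : r - 1 < M.length := by omega
    have hje : j = r - 1 := by
      by_contra hne
      have hjlt : j < r - 1 := by omega
      have := (hpw' j (r - 1) hj hrlt hjlt).2
      have := hbelow (r - 1) hrlt (by omega)
      omega
    subst hje
    refine ⟨hrpos, ?_⟩
    rw [List.getD_eq_getElem M (0, 0) hrlt]
    exact hj2

lemma B_eq_filter (peaks : List Int) (rs : List (Int × Int)) (h : rs ≠ []) :
    apply_channel_range_filter_alt peaks rs = peaks.filter (fun p => rs.any (pvCov p)) := by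
  unfold apply_channel_range_filter_alt
  rw [if_neg h]
  set ss := PySem.List.sorted rs (fun r => r.1) false with hss
  obtain ⟨hpw0, hcov0⟩ := merge_invariant ss []
    (PySem.List.sorted_pairwise rs (fun r => r.1)) (by simp) (by simp)
  set res := ss.foldl pvMergeStep [] with hres
  have hpw : res.reverse.Pairwise (fun a b => a.1 ≤ b.1 ∧ a.2 < b.1) := by
    rw [List.pairwise_reverse]; exact hpw0
  have hcov : ∀ p, res.reverse.any (pvCov p) = rs.any (pvCov p) := by
    intro p
    rw [List.any_reverse, hcov0 p]
    simpa using (PySem.List.sorted_perm rs (fun r => r.1) false).any_eq (f := pvCov p)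
  have hf : (fun (out : List Int) (p : Int) =>
        let i := pvBsearch res.reverse p 0 res.reverse.length
        if 0 < i ∧ p ≤ (res.reverse.getD (i - 1) (0, 0)).2 then out ++ [p] else out)
      = fun out p => if (fun q => rs.any (pvCov q)) p = true then out ++ [id p] else out := by
    funext out p
    simp only [id]
    by_cases hc : res.reverse.any (pvCov p) = true
    · rw [if_pos ((keep_iff_any res.reverse p hpw).mpr hc), if_pos (by rw [hcov p] at hc; simp [hc])]
    · rw [if_neg (fun hk => hc ((keep_iff_any res.reverse p hpw).mp hk)),
        if_neg (by rw [hcov p] at hc; simp [hc])]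
  show List.foldl (fun out p =>
      let i := pvBsearch res.reverse p 0 res.reverse.length
      if 0 < i ∧ p ≤ (res.reverse.getD (i - 1) (0, 0)).2 then out ++ [p] else out) [] peaks
    = List.filter (fun p => rs.any (pvCov p)) peaks
  rw [hf, PySem.List.foldl_append_if]
  simp

-- ===== VERDICT (by name: the statement is the Claim_ definition above) =====
theorem apply_channel_range_filter_spec : Claim_equal_apply_channel_range_filter := by
  intro peaks rs _
  unfold Spec_apply_channel_range_filter
  by_cases h : rs = []
  · simp [apply_channel_range_filter, apply_channel_range_filter_alt, h]
  · rw [A_eq_filter peaks rs h, B_eq_filter peaks rs h]
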